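-- pv_equiv track=rewrite | github.com/GaloisInc/witness-checker | scripts/multi_exec.py | join_sets
-- ===== SOURCE A (Python) =====
-- def join_sets(sets):
--     """Takes a list of sets an joins all the ones ones that intersect. You
--     can think of the input as partial equ8ivalence classses and the output
--     is all the disjoint equivalence classes.
--     This function is slow, but is not intended to be used in large inputs."""
--     disj_out = [] # Gathers all the final equivalence classes
--     for set in sets:
--         (join_sets, disj_sets) = ([],[])
--         for out_set in disj_out:
--             #append 'out_set' to the list it belongs depending on wether it intersects 'set'
--             (join_sets, disj_sets)[set.isdisjoint(out_set)].append(out_set)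
--
--         # Join all intersecting classes with the new set
--         new_class = set.union(*join_sets)
--         disj_out = disj_sets + [new_class]
--     return disj_out
-- ===== SOURCE B (Python) =====
-- def join_sets(sets):
--     """Union-find over class ids: input set i becomes node i; the existing root
--     classes it intersects (found through an element->first-owner map) become its
--     children.  A second phase emits each surviving root's class by unioning the
--     input sets collected from its merge tree (preorder)."""
--     root = {}      # class id -> id of its current root class
--     children = {}  # class id -> root ids it absorbed at creation, ascending
--     owner = {}     # element -> id of the class that first saw it
--     for i, s in enumerate(sets):
--         hits = sorted({root[owner[x]] for x in s if x in owner})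
--         children[i] = hits
--         root[i] = i
--         for j in root:
--             if root[j] in hits:
--                 root[j] = i
--         for x in s:
--             owner.setdefault(x, i)
--     out = []
--     for i in range(len(sets)):
--         if root.get(i) == i:
--             ids = []
--             _collect(children, i, ids)
--             out.append(set().union(*(sets[j] for j in ids)))
--     return out
--
-- def _collect(children, i, acc):
--     acc.append(i)
--     for c in children[i]:
--         _collect(children, c, acc)
-- ===== Notes on version B (the rewrite author's own statement) =====
-- stated objective: alternative
-- what changed: B replaces A's per-set rescan of all current classes (partition by isdisjoint, then one n-ary union) by union-find over class ids: an element->first-owner dict finds the intersecting root classes directly, a merge forest records which root classes each new set absorbs, and a second phase emits each surviving root's class by unioning the input sets collected from its merge tree in preorder.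
import Mathlib
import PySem

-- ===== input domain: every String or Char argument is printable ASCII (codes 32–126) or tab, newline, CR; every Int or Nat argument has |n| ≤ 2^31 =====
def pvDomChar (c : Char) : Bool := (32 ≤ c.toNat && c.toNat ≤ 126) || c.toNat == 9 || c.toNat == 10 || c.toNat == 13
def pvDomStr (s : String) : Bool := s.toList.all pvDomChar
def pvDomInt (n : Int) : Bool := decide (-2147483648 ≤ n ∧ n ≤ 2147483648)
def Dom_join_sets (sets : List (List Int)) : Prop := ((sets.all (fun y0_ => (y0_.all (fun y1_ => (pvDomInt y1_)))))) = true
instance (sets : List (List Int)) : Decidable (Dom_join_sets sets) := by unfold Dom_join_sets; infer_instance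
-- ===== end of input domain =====

-- B replaces A's rescan-all-classes-per-set algorithm by union-find over class ids
-- (element -> first-owner map, merge forest, preorder emit) — a different algorithm (alternative).

-- ===== PORT A =====
-- for each set: partition disj_out into (join_sets, disj_sets), then new_class = set.union(*join_sets)
def join_sets (sets : List (List Int)) : List (List Int) :=
  sets.foldl
    (fun disj_out st =>
      let p := disj_out.foldl
        (fun (jd : List (List Int) × List (List Int)) out_set =>
          if PySem.Set.isdisjoint (PySem.Set.ofList st) out_set then (jd.1, jd.2 ++ [out_set])
          else (jd.1 ++ [out_set], jd.2))
        ([], [])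
      let new_class := p.1.foldl (fun a c => PySem.Set.union a c) (PySem.Set.ofList st)
      p.2 ++ [new_class])
    []

-- ===== PORT B =====
-- _collect(children, i, acc): DFS preorder of the merge tree; the fuel argument only
-- guards termination (children ids are strictly smaller, so fuel = len(sets) is never exhausted)
def pvCollect (ch : PySem.Dict Int (List Int)) : Nat → Int → List Int
  | 0, i => [i]
  | f + 1, i => i :: (PySem.Dict.getD ch i []).flatMap (pvCollect ch f)

-- one iteration of B's main loop, state (root, children, owner), argument (i, s)
def pvStepB (st : PySem.Dict Int Int × PySem.Dict Int (List Int) × PySem.Dict Int Int)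
    (p : Int × List Int) :
    PySem.Dict Int Int × PySem.Dict Int (List Int) × PySem.Dict Int Int :=
  let i := p.1
  let s := p.2
  -- hits = sorted({root[owner[x]] for x in s if x in owner})
  let hits := PySem.List.sorted
    (s.foldl (fun (h : PySem.Set Int) x =>
        match PySem.Dict.get? st.2.2 x with
        | none => h
        | some j => PySem.Set.add h (PySem.Dict.getD st.1 j j)) PySem.Set.empty)
    (fun r => r) false
  let children := PySem.Dict.insert st.2.1 i hits
  let root := PySem.Dict.insert st.1 i i
  -- for j in root: if root[j] in hits: root[j] = i
  let root := (PySem.Dict.keys root).foldl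
    (fun r j => if PySem.Set.contains hits (PySem.Dict.getD r j j) then PySem.Dict.insert r j i else r)
    root
  -- for x in s: owner.setdefault(x, i)
  let owner := s.foldl (fun o x => PySem.Dict.setdefault o x i) st.2.2
  (root, children, owner)

def join_sets_alt (sets : List (List Int)) : List (List Int) :=
  let fin := (PySem.List.enumerate sets 0).foldl pvStepB
    (PySem.Dict.empty, PySem.Dict.empty, PySem.Dict.empty)
  (PySem.List.pyRange 0 (PySem.List.len sets) 1).foldl
    (fun out i =>
      if PySem.Dict.get? fin.1 i == some i then
        out ++ [(pvCollect fin.2.1 sets.length i).foldl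
                  (fun (acc : PySem.Set Int) j => PySem.Set.union acc (PySem.List.pyGetD sets j []))
                  PySem.Set.empty]
      else out)
    []

-- ===== PRECONDITION & SPEC =====
def Spec_join_sets (sets : List (List Int)) (out : List (List Int)) : Prop := out = join_sets_alt sets
instance (sets : List (List Int)) (out : List (List Int)) : Decidable (Spec_join_sets sets out) := by unfold Spec_join_sets; infer_instance

-- ===== CLAIM (what is proved, stated in full; the proofs are below) =====
def Claim_equal_join_sets : Prop := ∀ (sets : List (List Int)), Dom_join_sets sets → Spec_join_sets sets (join_sets sets)

-- ===== LEMMAS AND PROOFS =====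

-- the class of root r: first occurrences of the input sets collected along r's merge tree
def pvCls (sets : List (List Int)) (ch : PySem.Dict Int (List Int)) (r : Int) : List Int :=
  PySem.Set.ofList ((pvCollect ch sets.length r).flatMap (fun j => PySem.List.pyGetD sets j []))

-- surviving roots among ids < t, ascending
def pvRoots (root : PySem.Dict Int Int) (t : Nat) : List Int :=
  (PySem.List.pyRange 0 (t : Int) 1).filter (fun j => PySem.Dict.get? root j == some j)

def pvEdges (ch : PySem.Dict Int (List Int)) : Prop :=
  ∀ j l, PySem.Dict.get? ch j = some l → ∀ c ∈ l, 0 ≤ c ∧ c < j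

-- loop invariant after the first t input sets
def pvInv (sets : List (List Int)) (t : Nat) (root : PySem.Dict Int Int)
    (ch : PySem.Dict Int (List Int)) (owner : PySem.Dict Int Int) : Prop :=
  (PySem.Dict.keys root).Nodup ∧
  (∀ j : Int, (PySem.Dict.get? root j).isSome ↔ 0 ≤ j ∧ j < (t : Int)) ∧
  (∀ j r : Int, PySem.Dict.get? root j = some r → j ≤ r ∧ r < (t : Int) ∧ PySem.Dict.get? root r = some r) ∧
  pvEdges ch ∧
  (∀ x j : Int, PySem.Dict.get? owner x = some j → 0 ≤ j ∧ j < (t : Int)) ∧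
  (∀ r : Int, PySem.Dict.get? root r = some r →
    ∀ x : Int, (x ∈ pvCls sets ch r ↔ ∃ j, PySem.Dict.get? owner x = some j ∧ PySem.Dict.get? root j = some r))

-- ---- generic utilities ----

-- dict.setdefault: inserts only a missing key
theorem pvSetdefault_get? (d : PySem.Dict Int Int) (k v k' : Int) :
    (PySem.Dict.setdefault d k v).get? k' =
      if k' = k ∧ d.get? k = none then some v else d.get? k' := by
  have hins : PySem.Dict.setdefault d k v = if d.contains k then d else d.insert k v := by
    simp only [PySem.Dict.setdefault, PySem.Dict.contains_eq_decide_mem_keys, decide_eq_true_eq]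
    split_ifs with h
    · rfl
    · apply PySem.Dict.ext
      rw [PySem.Dict.items_insert_of_not_contains]
      simp [PySem.Dict.contains_eq_decide_mem_keys, h]
  rw [hins]
  by_cases h : d.contains k
  · have : d.get? k ≠ none := by
      rw [PySem.Dict.contains_eq_isSome_get?] at h
      simpa [Option.isSome_iff_ne_none] using h
    simp [h, this]
  · have hn : d.get? k = none := by
      rw [PySem.Dict.contains_eq_isSome_get?] at h
      simpa [Option.isSome_iff_ne_none] using h
    simp only [h, Bool.false_eq_true, if_false, PySem.Dict.get?_insert, hn]
    by_cases hk : k' = k <;> simp [hk]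

-- 'for x in s: owner.setdefault(x, i)'
theorem pvOwner_fold_get? (i : Int) (l : List Int) (o : PySem.Dict Int Int) (x : Int) :
    (l.foldl (fun o x => PySem.Dict.setdefault o x i) o).get? x =
      if (o.get? x).isSome then o.get? x else (if x ∈ l then some i else none) := by
  induction l generalizing o with
  | nil => cases hg : o.get? x <;> simp [hg]
  | cons y l ih =>
    simp only [List.foldl_cons, ih, pvSetdefault_get?, List.mem_cons]
    by_cases hxy : x = y
    · subst hxy
      by_cases h : o.get? x = none <;> simp [h, Option.isSome_iff_ne_none]
    · simp only [hxy, false_and, if_false, false_or]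

-- set.update absorbs an inner update (deduplicating the argument does not matter)
theorem pvUpdate_update (l : List Int) : ∀ (s t : PySem.Set Int),
    PySem.Set.update s (PySem.Set.update t l) = PySem.Set.update (PySem.Set.update s t) l := by
  induction l with
  | nil => intro s t; rfl
  | cons x l ih =>
    intro s t
    have hadd : PySem.Set.update s (PySem.Set.add t x) = PySem.Set.add (PySem.Set.update s t) x := by
      by_cases hx : x ∈ t
      · rw [PySem.Set.add_of_mem hx, PySem.Set.add_of_mem]
        rw [PySem.Set.mem_update]; exact Or.inr hx
      · rw [PySem.Set.add_of_not_mem hx]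
        show PySem.Set.update s (t ++ [x]) = _
        rw [PySem.Set.update_append]; rfl
    calc PySem.Set.update s (PySem.Set.update (PySem.Set.add t x) l)
        = PySem.Set.update (PySem.Set.update s (PySem.Set.add t x)) l := ih s (PySem.Set.add t x)
      _ = PySem.Set.update (PySem.Set.add (PySem.Set.update s t) x) l := by rw [hadd]

theorem pvUpdate_ofList (s : PySem.Set Int) (l : List Int) :
    PySem.Set.update s (PySem.Set.ofList l) = PySem.Set.update s l := by
  simpa using pvUpdate_update l s []

theorem pvUnion_ofList_raw (a b : List Int) :
    PySem.Set.union (PySem.Set.ofList a) b = PySem.Set.ofList (a ++ b) := by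
  show PySem.Set.update (PySem.Set.ofList a) b = _
  rw [PySem.Set.ofList_append]

theorem pvUnion_ofList (a b : List Int) :
    PySem.Set.union (PySem.Set.ofList a) (PySem.Set.ofList b) = PySem.Set.ofList (a ++ b) := by
  show PySem.Set.update (PySem.Set.ofList a) (PySem.Set.ofList b) = _
  rw [pvUpdate_ofList, PySem.Set.ofList_append]

-- a fold of unions over already-deduplicated classes is one big dedup
theorem pvFoldUnion_map (f : Int → List Int) (L : List Int) : ∀ (a0 : List Int),
    (L.map (fun r => PySem.Set.ofList (f r))).foldl (fun a c => PySem.Set.union a c)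
      (PySem.Set.ofList a0) = PySem.Set.ofList (a0 ++ L.flatMap f) := by
  induction L with
  | nil => intro a0; simp
  | cons r L ih =>
    intro a0
    simp only [List.map_cons, List.foldl_cons, pvUnion_ofList, List.flatMap_cons]
    rw [ih (a0 ++ f r)]
    simp

-- a fold of unions of raw lists from the empty set is one big dedup
theorem pvFoldUnion_raw (g : Int → List Int) (L : List Int) : ∀ (a0 : List Int),
    L.foldl (fun acc j => PySem.Set.union acc (g j)) (PySem.Set.ofList a0)
      = PySem.Set.ofList (a0 ++ L.flatMap g) := by
  induction L with
  | nil => intro a0; simp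
  | cons j L ih =>
    intro a0
    simp only [List.foldl_cons, pvUnion_ofList_raw, List.flatMap_cons]
    rw [ih (a0 ++ g j)]
    simp

-- ---- pvCollect: fuel irrelevance, stability under inserting a larger node ----

theorem pvCollect_fuel (ch : PySem.Dict Int (List Int)) (hch : pvEdges ch) :
    ∀ (m : Nat) (j : Int) (f f' : Nat), j.toNat < m → 0 ≤ j → j < (f : Int) → j < (f' : Int) →
      pvCollect ch f j = pvCollect ch f' j := by
  intro m
  induction m with
  | zero => intro j f f' h; omega
  | succ m ih =>
    intro j f f' hm hj hf hf'
    obtain ⟨a, rfl⟩ : ∃ a, f = a + 1 := ⟨f - 1, by omega⟩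
    obtain ⟨b, rfl⟩ : ∃ b, f' = b + 1 := ⟨f' - 1, by omega⟩
    simp only [pvCollect]
    congr 1
    apply List.flatMap_congr
    intro c hc
    have hcj : 0 ≤ c ∧ c < j := by
      rcases hget : PySem.Dict.get? ch j with _ | l
      · simp [PySem.Dict.getD_eq_get?_getD, hget] at hc
      · have := hch j l hget c
        simp [PySem.Dict.getD_eq_get?_getD, hget] at hc
        exact this hc
    exact ih c a b (by omega) hcj.1 (by omega) (by omega)

theorem pvCollect_insert (ch : PySem.Dict Int (List Int)) (hch : pvEdges ch)
    (k : Int) (l : List Int) :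
    ∀ (f : Nat) (j : Int), 0 ≤ j → j < k → pvCollect (PySem.Dict.insert ch k l) f j = pvCollect ch f j := by
  intro f
  induction f with
  | zero => intro j _ _; rfl
  | succ f ih =>
    intro j hj hjk
    simp only [pvCollect]
    have hgd : PySem.Dict.getD (PySem.Dict.insert ch k l) j [] = PySem.Dict.getD ch j [] := by
      rw [PySem.Dict.getD_insert]
      simp [show ¬ j = k by omega]
    rw [hgd]
    congr 1
    apply List.flatMap_congr
    intro c hc
    have hcj : 0 ≤ c ∧ c < j := by
      rcases hget : PySem.Dict.get? ch j with _ | l'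
      · simp [PySem.Dict.getD_eq_get?_getD, hget] at hc
      · have := hch j l' hget c
        simp [PySem.Dict.getD_eq_get?_getD, hget] at hc
        exact this hc
    exact ih c hcj.1 (by omega)

-- ---- the relabel loop 'for j in root: if root[j] in hits: root[j] = i' ----

theorem pvRelabel_get? (hits : List Int) (i : Int) :
    ∀ (ks : List Int), ks.Nodup → ∀ (r : PySem.Dict Int Int) (j : Int),
    (ks.foldl (fun r j => if PySem.Set.contains hits (PySem.Dict.getD r j j) then PySem.Dict.insert r j i else r) r).get? j
      = if j ∈ ks ∧ PySem.Set.contains hits (PySem.Dict.getD r j j) then some i else r.get? j := by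
  intro ks
  induction ks with
  | nil => intro _ r j; simp
  | cons k ks ih =>
    intro hnd r j
    obtain ⟨hk, hnd'⟩ := List.nodup_cons.mp hnd
    simp only [List.foldl_cons]
    rcases hcond : PySem.Set.contains hits (PySem.Dict.getD r k k) with _ | _
    · simp only [Bool.false_eq_true, if_false]
      rw [ih hnd' r j]
      by_cases hjk : j = k
      · subst hjk
        simp only [hcond, Bool.false_eq_true, and_false, if_false]
      · simp only [List.mem_cons, hjk, false_or]
    · simp only [if_true]
      rw [ih hnd' (PySem.Dict.insert r k i) j]
      by_cases hjk : j = k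
      · subst hjk
        simp only [hk, false_and, if_false, List.mem_cons, true_or, true_and, hcond, if_true,
          PySem.Dict.get?_insert_self]
      · have hgd : PySem.Dict.getD (PySem.Dict.insert r k i) j j = PySem.Dict.getD r j j := by
          rw [PySem.Dict.getD_insert]; simp [hjk]
        have hg : (PySem.Dict.insert r k i).get? j = r.get? j := by
          rw [PySem.Dict.get?_insert]; simp [hjk]
        rw [hgd, hg]
        simp [List.mem_cons, hjk]

theorem pvRelabel_nodup_keys (hits : List Int) (i : Int) (ks : List Int) :
    ∀ (r : PySem.Dict Int Int), r.keys.Nodup →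
    ((ks.foldl (fun r j => if PySem.Set.contains hits (PySem.Dict.getD r j j) then PySem.Dict.insert r j i else r) r).keys).Nodup := by
  induction ks with
  | nil => intro r h; exact h
  | cons k ks ih =>
    intro r h
    simp only [List.foldl_cons]
    split_ifs
    · exact ih _ (PySem.Dict.nodup_keys_insert r k i h)
    · exact ih r h

-- ---- the hits accumulator '{root[owner[x]] for x in s if x in owner}' ----

theorem pvHits_mem (owner root : PySem.Dict Int Int) (s : List Int) :
    ∀ (acc : PySem.Set Int) (r : Int),
    (r ∈ s.foldl (fun (h : PySem.Set Int) x =>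
        match PySem.Dict.get? owner x with
        | none => h
        | some j => PySem.Set.add h (PySem.Dict.getD root j j)) acc)
      ↔ r ∈ acc ∨ ∃ x ∈ s, ∃ j, PySem.Dict.get? owner x = some j ∧ PySem.Dict.getD root j j = r := by
  induction s with
  | nil => intro acc r; simp
  | cons x s ih =>
    intro acc r
    simp only [List.foldl_cons]
    rcases hx : PySem.Dict.get? owner x with _ | j
    · rw [ih acc r]
      constructor
      · rintro (h | ⟨y, hy, j, hj, hr⟩)
        · exact Or.inl h
        · exact Or.inr ⟨y, List.mem_cons_of_mem _ hy, j, hj, hr⟩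
      · rintro (h | ⟨y, hy, j, hj, hr⟩)
        · exact Or.inl h
        · rcases List.mem_cons.mp hy with rfl | hy'
          · rw [hx] at hj; cases hj
          · exact Or.inr ⟨y, hy', j, hj, hr⟩
    · rw [ih _ r]
      rw [PySem.Set.mem_add]
      constructor
      · rintro ((h | rfl) | ⟨y, hy, j', hj, hr⟩)
        · exact Or.inl h
        · exact Or.inr ⟨x, List.mem_cons_self .., j, hx, rfl⟩
        · exact Or.inr ⟨y, List.mem_cons_of_mem _ hy, j', hj, hr⟩
      · rintro (h | ⟨y, hy, j', hj, hr⟩)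
        · exact Or.inl (Or.inl h)
        · rcases List.mem_cons.mp hy with rfl | hy'
          · rw [hx] at hj
            cases hj
            exact Or.inl (Or.inr hr.symm)
          · exact Or.inr ⟨y, hy', j', hj, hr⟩

theorem pvHits_nodup (owner root : PySem.Dict Int Int) (s : List Int) :
    ∀ (acc : PySem.Set Int), acc.Nodup →
    (s.foldl (fun (h : PySem.Set Int) x =>
        match PySem.Dict.get? owner x with
        | none => h
        | some j => PySem.Set.add h (PySem.Dict.getD root j j)) acc).Nodup := by
  induction s with
  | nil => intro acc h; exact h
  | cons x s ih =>
    intro acc h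
    simp only [List.foldl_cons]
    rcases PySem.Dict.get? owner x with _ | j
    · exact ih acc h
    · exact ih _ (PySem.Set.nodup_add acc _ h)

-- ---- pvRoots ----

theorem pvRoots_mem (root : PySem.Dict Int Int) (t : Nat) (j : Int) :
    j ∈ pvRoots root t ↔ 0 ≤ j ∧ j < (t : Int) ∧ PySem.Dict.get? root j = some j := by
  simp only [pvRoots, List.mem_filter, PySem.List.mem_pyRange_one, beq_iff_eq]
  tauto

theorem pvRoots_pairwise (root : PySem.Dict Int Int) (t : Nat) :
    (pvRoots root t).Pairwise (· < ·) := by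
  exact List.Pairwise.filter _ (PySem.List.pairwise_lt_pyRange_one 0 (t : Int))

-- two strictly increasing Int lists with the same members are equal
theorem pvSortedExt (l₁ l₂ : List Int) (h₁ : l₁.Pairwise (· < ·)) (h₂ : l₂.Pairwise (· < ·))
    (hmem : ∀ x, x ∈ l₁ ↔ x ∈ l₂) : l₁ = l₂ := by
  have hn₁ : l₁.Nodup := h₁.imp (fun h => ne_of_lt h)
  have hn₂ : l₂.Nodup := h₂.imp (fun h => ne_of_lt h)
  exact PySem.List.eq_of_perm_of_pairwise_le_of_injective (fun x => x) (fun a b h => h)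
    ((List.perm_ext_iff_of_nodup hn₁ hn₂).mpr hmem)
    (h₁.imp le_of_lt) (h₂.imp le_of_lt)

-- A's inner fold is a partition of the classes by disjointness with the fixed set s
theorem pvA_fold (s : List Int) (L : List (List Int)) (j d : List (List Int)) :
    L.foldl
      (fun (jd : List (List Int) × List (List Int)) out_set =>
        if PySem.Set.isdisjoint (PySem.Set.ofList s) out_set then (jd.1, jd.2 ++ [out_set])
        else (jd.1 ++ [out_set], jd.2)) (j, d)
    = (j ++ L.filter (fun c => !PySem.Set.isdisjoint (PySem.Set.ofList s) c),
       d ++ L.filter (fun c => PySem.Set.isdisjoint (PySem.Set.ofList s) c)) := by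
  induction L generalizing j d with
  | nil => simp
  | cons c L ih =>
    rcases hb : PySem.Set.isdisjoint (PySem.Set.ofList s) c with _ | _
    · simp only [List.foldl_cons, hb, Bool.false_eq_true, if_false, List.filter_cons, Bool.not_false]
      rw [ih]
      simp
    · simp only [List.foldl_cons, hb, if_true, List.filter_cons, Bool.not_true]
      rw [ih]
      simp

-- named pieces of one pvStepB step
def pvHitsRaw (root owner : PySem.Dict Int Int) (s : List Int) : PySem.Set Int :=
  s.foldl (fun (h : PySem.Set Int) x =>
    match PySem.Dict.get? owner x with
    | none => h
    | some j => PySem.Set.add h (PySem.Dict.getD root j j)) PySem.Set.empty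

def pvHitsOf (root owner : PySem.Dict Int Int) (s : List Int) : List Int :=
  PySem.List.sorted (pvHitsRaw root owner s) (fun r => r) false

def pvRootNew (root owner : PySem.Dict Int Int) (s : List Int) (i : Int) : PySem.Dict Int Int :=
  ((PySem.Dict.insert root i i).keys).foldl
    (fun r j => if PySem.Set.contains (pvHitsOf root owner s) (PySem.Dict.getD r j j)
                then PySem.Dict.insert r j i else r)
    (PySem.Dict.insert root i i)

-- membership in hits, with owners resolved through the invariant
theorem pvHits_mem_inv (_sets : List (List Int)) (t : Nat) (root owner : PySem.Dict Int Int)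
    (s : List Int)
    (hdom : ∀ j : Int, (PySem.Dict.get? root j).isSome ↔ 0 ≤ j ∧ j < (t : Int))
    (hown : ∀ x j : Int, PySem.Dict.get? owner x = some j → 0 ≤ j ∧ j < (t : Int))
    (r : Int) :
    r ∈ pvHitsOf root owner s ↔
      ∃ x ∈ s, ∃ j, PySem.Dict.get? owner x = some j ∧ PySem.Dict.get? root j = some r := by
  rw [pvHitsOf, PySem.List.mem_sorted, pvHitsRaw, pvHits_mem]
  simp only [PySem.Set.empty, List.not_mem_nil, false_or]
  constructor
  · rintro ⟨x, hx, j, hj, hr⟩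
    obtain ⟨rj, hrj⟩ : ∃ rj, PySem.Dict.get? root j = some rj := by
      have := (hdom j).mpr (hown x j hj)
      exact Option.isSome_iff_exists.mp this
    rw [PySem.Dict.getD_eq_get?_getD, hrj] at hr
    simp only [Option.getD_some] at hr
    exact ⟨x, hx, j, hj, hr ▸ hrj⟩
  · rintro ⟨x, hx, j, hj, hr⟩
    exact ⟨x, hx, j, hj, by rw [PySem.Dict.getD_eq_get?_getD, hr]; rfl⟩

-- hits is a strictly increasing list of surviving roots below t
theorem pvHits_pairwise (root owner : PySem.Dict Int Int) (s : List Int) :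
    (pvHitsOf root owner s).Pairwise (· < ·) := by
  have hle : (pvHitsOf root owner s).Pairwise (fun a b => a ≤ b) :=
    PySem.List.sorted_pairwise (pvHitsRaw root owner s) (fun r => r)
  have hnd : (pvHitsOf root owner s).Nodup := by
    refine (PySem.List.sorted_perm (pvHitsRaw root owner s) (fun r => r) false).nodup_iff.mpr ?_
    exact pvHits_nodup owner root s PySem.Set.empty (List.nodup_nil)
  exact (hle.and hnd).imp (fun ⟨h1, h2⟩ => lt_of_le_of_ne h1 h2)

theorem pvHits_root (sets : List (List Int)) (t : Nat) (root owner : PySem.Dict Int Int)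
    (s : List Int)
    (hdom : ∀ j : Int, (PySem.Dict.get? root j).isSome ↔ 0 ≤ j ∧ j < (t : Int))
    (hroot : ∀ j r : Int, PySem.Dict.get? root j = some r → j ≤ r ∧ r < (t : Int) ∧ PySem.Dict.get? root r = some r)
    (hown : ∀ x j : Int, PySem.Dict.get? owner x = some j → 0 ≤ j ∧ j < (t : Int))
    (r : Int) (hr : r ∈ pvHitsOf root owner s) :
    0 ≤ r ∧ r < (t : Int) ∧ PySem.Dict.get? root r = some r := by
  obtain ⟨x, hx, j, hj, hg⟩ := (pvHits_mem_inv sets t root owner s hdom hown r).mp hr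
  obtain ⟨_, h2, h3⟩ := hroot j r hg
  have h0 : 0 ≤ r := by
    have := (hdom r).mp (by rw [h3]; rfl)
    exact this.1
  exact ⟨h0, h2, h3⟩

-- the relabelled root map, pointwise
theorem pvRootNew_get?_new (root owner : PySem.Dict Int Int) (s : List Int) (t : Nat)
    (hnodup : root.keys.Nodup)
    (hhlt : ∀ r ∈ pvHitsOf root owner s, r < (t : Int)) :
    (pvRootNew root owner s (t : Int)).get? (t : Int) = some (t : Int) := by
  rw [pvRootNew, pvRelabel_get? _ _ _ (PySem.Dict.nodup_keys_insert root _ _ hnodup)]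
  have hgd : PySem.Dict.getD (PySem.Dict.insert root (t : Int) (t : Int)) (t : Int) (t : Int) = (t : Int) := by
    rw [PySem.Dict.getD_insert]; simp
  rw [hgd]
  have hnc : PySem.Set.contains (pvHitsOf root owner s) (t : Int) = false := by
    cases hb : PySem.Set.contains (pvHitsOf root owner s) (t : Int)
    · rfl
    · exact absurd (hhlt _ ((PySem.Set.contains_iff _ _).mp hb)) (by omega)
  rw [hnc]
  simp [PySem.Dict.get?_insert_self]

theorem pvRootNew_get?_old (root owner : PySem.Dict Int Int) (s : List Int) (t : Nat)
    (hnodup : root.keys.Nodup) (j rj : Int) (hj : j ≠ (t : Int))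
    (hg : root.get? j = some rj) :
    (pvRootNew root owner s (t : Int)).get? j =
      if rj ∈ pvHitsOf root owner s then some (t : Int) else some rj := by
  rw [pvRootNew, pvRelabel_get? _ _ _ (PySem.Dict.nodup_keys_insert root _ _ hnodup)]
  have hgd : PySem.Dict.getD (PySem.Dict.insert root (t : Int) (t : Int)) j j = rj := by
    rw [PySem.Dict.getD_insert]
    simp only [hj, if_false]
    rw [PySem.Dict.getD_eq_get?_getD, hg]; rfl
  rw [hgd]
  have hmem : j ∈ (PySem.Dict.insert root (t : Int) (t : Int)).keys := by
    rw [PySem.Dict.mem_keys_insert]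
    right
    by_contra h
    rw [← PySem.Dict.get?_eq_none_iff_not_mem_keys] at h
    rw [h] at hg; cases hg
  by_cases hin : rj ∈ pvHitsOf root owner s
  · have : PySem.Set.contains (pvHitsOf root owner s) rj = true :=
      (PySem.Set.contains_iff _ _).mpr hin
    simp [hmem, hin]
  · have : PySem.Set.contains (pvHitsOf root owner s) rj = false := by
      cases hb : PySem.Set.contains (pvHitsOf root owner s) rj
      · rfl
      · exact absurd ((PySem.Set.contains_iff _ _).mp hb) hin
    simp only [this, Bool.false_eq_true, and_false, if_false, hin, if_false]
    rw [PySem.Dict.get?_insert]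
    simp [hj, hg]

theorem pvRootNew_get?_none (root owner : PySem.Dict Int Int) (s : List Int) (t : Nat)
    (hnodup : root.keys.Nodup) (j : Int) (hj : j ≠ (t : Int))
    (hg : root.get? j = none) :
    (pvRootNew root owner s (t : Int)).get? j = none := by
  rw [pvRootNew, pvRelabel_get? _ _ _ (PySem.Dict.nodup_keys_insert root _ _ hnodup)]
  have hmem : j ∉ (PySem.Dict.insert root (t : Int) (t : Int)).keys := by
    rw [PySem.Dict.mem_keys_insert]
    rintro (h | h)
    · exact hj h
    · exact absurd h ((PySem.Dict.get?_eq_none_iff_not_mem_keys _ _).mp hg)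
  simp only [hmem, false_and, if_false]
  rw [PySem.Dict.get?_insert]
  simp [hj, hg]

-- the new node's class: its own set, then the absorbed classes in hits order
theorem pvCls_insert_stable (sets : List (List Int)) (ch : PySem.Dict Int (List Int))
    (hch : pvEdges ch) (i : Int) (l : List Int) (r : Int) (h0 : 0 ≤ r) (hri : r < i) :
    pvCls sets (PySem.Dict.insert ch i l) r = pvCls sets ch r := by
  unfold pvCls
  rw [pvCollect_insert ch hch i l sets.length r h0 hri]

theorem pvClsT (sets : List (List Int)) (t : Nat) (ht : t < sets.length)
    (ch : PySem.Dict Int (List Int)) (hch : pvEdges ch) (hits : List Int)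
    (hb : ∀ r ∈ hits, 0 ≤ r ∧ r < (t : Int)) :
    pvCls sets (PySem.Dict.insert ch (t : Int) hits) (t : Int) =
      PySem.Set.ofList (sets[t] ++ hits.flatMap (fun r =>
        (pvCollect ch sets.length r).flatMap (fun j => PySem.List.pyGetD sets j []))) := by
  obtain ⟨m, hm⟩ : ∃ m, sets.length = m + 1 := ⟨sets.length - 1, by omega⟩
  have hgd : PySem.Dict.getD (PySem.Dict.insert ch (t : Int) hits) (t : Int) [] = hits := by
    rw [PySem.Dict.getD_insert]; simp
  have hhead : pvCollect (PySem.Dict.insert ch (t : Int) hits) sets.length (t : Int)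
      = (t : Int) :: hits.flatMap (pvCollect (PySem.Dict.insert ch (t : Int) hits) m) := by
    rw [hm]
    show (t : Int) :: (PySem.Dict.getD (PySem.Dict.insert ch (t : Int) hits) (t : Int) []).flatMap _ = _
    rw [hgd]
  have hcoll : hits.flatMap (pvCollect (PySem.Dict.insert ch (t : Int) hits) m)
      = hits.flatMap (fun r => pvCollect ch sets.length r) := by
    apply List.flatMap_congr
    intro r hr
    obtain ⟨h0, hrt⟩ := hb r hr
    rw [pvCollect_insert ch hch (t : Int) hits m r h0 hrt]
    exact pvCollect_fuel ch hch (r.toNat + 1) r m sets.length (by omega) h0 (by omega) (by omega)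
  unfold pvCls
  rw [hhead, hcoll]
  simp only [List.flatMap_cons, List.flatMap_assoc]
  have hget : PySem.List.pyGetD sets (t : Int) [] = sets[t] := by
    rw [PySem.List.pyGetD_natCast]
    exact List.getD_eq_getElem sets [] ht
  rw [hget]

-- hits is exactly the ascending list of surviving roots whose class meets s
theorem pvHits_eq_filter (sets : List (List Int)) (t : Nat)
    (root owner : PySem.Dict Int Int) (ch : PySem.Dict Int (List Int)) (s : List Int)
    (hdom : ∀ j : Int, (PySem.Dict.get? root j).isSome ↔ 0 ≤ j ∧ j < (t : Int))
    (hroot : ∀ j r : Int, PySem.Dict.get? root j = some r → j ≤ r ∧ r < (t : Int) ∧ PySem.Dict.get? root r = some r)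
    (hown : ∀ x j : Int, PySem.Dict.get? owner x = some j → 0 ≤ j ∧ j < (t : Int))
    (hM : ∀ r : Int, PySem.Dict.get? root r = some r →
      ∀ x : Int, (x ∈ pvCls sets ch r ↔ ∃ j, PySem.Dict.get? owner x = some j ∧ PySem.Dict.get? root j = some r)) :
    pvHitsOf root owner s =
      (pvRoots root t).filter (fun r => !PySem.Set.isdisjoint (PySem.Set.ofList s) (pvCls sets ch r)) := by
  apply pvSortedExt _ _ (pvHits_pairwise root owner s)
    (List.Pairwise.filter _ (pvRoots_pairwise root t))
  intro r
  rw [List.mem_filter, pvHits_mem_inv sets t root owner s hdom hown, pvRoots_mem]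
  have hdisj : (!PySem.Set.isdisjoint (PySem.Set.ofList s) (pvCls sets ch r)) = true ↔
      ∃ x ∈ s, x ∈ pvCls sets ch r := by
    rw [Bool.not_eq_true']
    constructor
    · intro h
      by_contra hc
      push_neg at hc
      have : PySem.Set.isdisjoint (PySem.Set.ofList s) (pvCls sets ch r) = true := by
        rw [PySem.Set.isdisjoint_iff]
        intro x hx
        exact hc x ((PySem.Set.mem_ofList _ _).mp hx)
      rw [this] at h; cases h
    · rintro ⟨x, hx, hcl⟩
      cases hb : PySem.Set.isdisjoint (PySem.Set.ofList s) (pvCls sets ch r)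
      · rfl
      · rw [PySem.Set.isdisjoint_iff] at hb
        exact absurd hcl (hb x ((PySem.Set.mem_ofList _ _).mpr hx))
  constructor
  · rintro ⟨x, hx, j, hj, hg⟩
    obtain ⟨_, hrt, hrr⟩ := hroot j r hg
    have h0 : 0 ≤ r := ((hdom r).mp (by rw [hrr]; rfl)).1
    refine ⟨⟨h0, hrt, hrr⟩, ?_⟩
    rw [hdisj]
    exact ⟨x, hx, (hM r hrr x).mpr ⟨j, hj, hg⟩⟩
  · rintro ⟨⟨h0, hrt, hrr⟩, hd⟩
    rw [hdisj] at hd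
    obtain ⟨x, hx, hcl⟩ := hd
    obtain ⟨j, hj, hg⟩ := (hM r hrr x).mp hcl
    exact ⟨x, hx, j, hj, hg⟩

-- the surviving roots after the step: the disjoint old roots, then t
theorem pvRootsNew_eq (sets : List (List Int)) (t : Nat)
    (root owner : PySem.Dict Int Int) (ch : PySem.Dict Int (List Int)) (s : List Int)
    (hnodup : root.keys.Nodup)
    (hdom : ∀ j : Int, (PySem.Dict.get? root j).isSome ↔ 0 ≤ j ∧ j < (t : Int))
    (hroot : ∀ j r : Int, PySem.Dict.get? root j = some r → j ≤ r ∧ r < (t : Int) ∧ PySem.Dict.get? root r = some r)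
    (hown : ∀ x j : Int, PySem.Dict.get? owner x = some j → 0 ≤ j ∧ j < (t : Int))
    (hM : ∀ r : Int, PySem.Dict.get? root r = some r →
      ∀ x : Int, (x ∈ pvCls sets ch r ↔ ∃ j, PySem.Dict.get? owner x = some j ∧ PySem.Dict.get? root j = some r)) :
    pvRoots (pvRootNew root owner s (t : Int)) (t + 1) =
      (pvRoots root t).filter (fun r => PySem.Set.isdisjoint (PySem.Set.ofList s) (pvCls sets ch r))
        ++ [(t : Int)] := by
  have hhlt : ∀ r ∈ pvHitsOf root owner s, r < (t : Int) := fun r hr =>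
    (pvHits_root sets t root owner s hdom hroot hown r hr).2.1
  apply pvSortedExt _ _ (pvRoots_pairwise _ _)
  · rw [List.pairwise_append]
    refine ⟨List.Pairwise.filter _ (pvRoots_pairwise root t), List.pairwise_singleton _ _, ?_⟩
    intro a ha b hb
    rw [List.mem_singleton] at hb
    subst hb
    have := (pvRoots_mem root t a).mp (List.mem_filter.mp ha).1
    omega
  · intro j
    rw [List.mem_append, List.mem_filter, List.mem_singleton, pvRoots_mem, pvRoots_mem]
    by_cases hjt : j = (t : Int)
    · subst hjt
      constructor
      · intro _; right; rfl
      · intro _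
        refine ⟨by omega, by omega, pvRootNew_get?_new root owner s t hnodup hhlt⟩
    · constructor
      · rintro ⟨h0, hlt, hg⟩
        rcases hold : root.get? j with _ | rj
        · rw [pvRootNew_get?_none root owner s t hnodup j hjt hold] at hg; cases hg
        · rw [pvRootNew_get?_old root owner s t hnodup j rj hjt hold] at hg
          by_cases hin : rj ∈ pvHitsOf root owner s
          · rw [if_pos hin] at hg
            cases hg; exact absurd rfl hjt
          · rw [if_neg hin] at hg
            injection hg with hg
            subst hg
            left
            have hjlt : rj < (t : Int) := ((hdom rj).mp (by rw [hold]; rfl)).2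
            refine ⟨⟨h0, hjlt, rfl⟩, ?_⟩
            rw [pvHits_eq_filter sets t root owner ch s hdom hroot hown hM, List.mem_filter] at hin
            push_neg at hin
            have := hin ((pvRoots_mem root t rj).mpr ⟨h0, hjlt, hold⟩)
            simpa using this
      · rintro (⟨⟨h0, hlt, hg⟩, hd⟩ | h)
        · refine ⟨h0, by omega, ?_⟩
          rw [pvRootNew_get?_old root owner s t hnodup j j hjt hg]
          have hnin : j ∉ pvHitsOf root owner s := by
            rw [pvHits_eq_filter sets t root owner ch s hdom hroot hown hM, List.mem_filter]
            rintro ⟨_, hcontra⟩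
            rw [hd] at hcontra
            cases hcontra
          rw [if_neg hnin]
        · exact absurd h hjt

-- the invariant survives one step
theorem pvInvStep (sets : List (List Int)) (t : Nat) (ht : t < sets.length)
    (root : PySem.Dict Int Int) (ch : PySem.Dict Int (List Int)) (owner : PySem.Dict Int Int)
    (inv : pvInv sets t root ch owner) :
    pvInv sets (t + 1) (pvRootNew root owner sets[t] (t : Int))
      (PySem.Dict.insert ch (t : Int) (pvHitsOf root owner sets[t]))
      (sets[t].foldl (fun o x => PySem.Dict.setdefault o x (t : Int)) owner) := by
  obtain ⟨hnodup, hdom, hroot, hedges, hown, hM⟩ := inv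
  have hhb : ∀ r ∈ pvHitsOf root owner sets[t], 0 ≤ r ∧ r < (t : Int) ∧ PySem.Dict.get? root r = some r :=
    fun r hr => pvHits_root sets t root owner sets[t] hdom hroot hown r hr
  have hhlt : ∀ r ∈ pvHitsOf root owner sets[t], r < (t : Int) := fun r hr => (hhb r hr).2.1
  have hnew := pvRootNew_get?_new root owner sets[t] t hnodup hhlt
  have hOwn : ∀ x : Int,
      (sets[t].foldl (fun o x => PySem.Dict.setdefault o x (t : Int)) owner).get? x =
        if (owner.get? x).isSome then owner.get? x else (if x ∈ sets[t] then some (t : Int) else none) :=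
    fun x => pvOwner_fold_get? (t : Int) sets[t] owner x
  refine ⟨?_, ?_, ?_, ?_, ?_, ?_⟩
  · exact pvRelabel_nodup_keys _ _ _ _ (PySem.Dict.nodup_keys_insert root _ _ hnodup)
  · intro j
    by_cases hjt : j = (t : Int)
    · subst hjt
      rw [hnew]
      simp only [Option.isSome_some, true_iff]
      omega
    · rcases hold : root.get? j with _ | rj
      · rw [pvRootNew_get?_none root owner sets[t] t hnodup j hjt hold]
        have hh : ¬(0 ≤ j ∧ j < (t : Int)) := by rw [← hdom j, hold]; simp
        simp only [Option.isSome_none, Bool.false_eq_true, false_iff]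
        push_cast
        omega
      · rw [pvRootNew_get?_old root owner sets[t] t hnodup j rj hjt hold]
        have hj := (hdom j).mp (by rw [hold]; rfl)
        split_ifs <;> simp <;> omega
  · intro j r hg
    by_cases hjt : j = (t : Int)
    · subst hjt
      rw [hnew] at hg
      injection hg with hg
      subst hg
      exact ⟨le_refl _, by omega, hnew⟩
    · rcases hold : root.get? j with _ | rj
      · rw [pvRootNew_get?_none root owner sets[t] t hnodup j hjt hold] at hg; cases hg
      · rw [pvRootNew_get?_old root owner sets[t] t hnodup j rj hjt hold] at hg
        have hj := (hdom j).mp (by rw [hold]; rfl)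
        obtain ⟨hjr, hrt, hrr⟩ := hroot j rj hold
        by_cases hin : rj ∈ pvHitsOf root owner sets[t]
        · rw [if_pos hin] at hg
          injection hg with hg
          subst hg
          exact ⟨by omega, by omega, hnew⟩
        · rw [if_neg hin] at hg
          injection hg with hg
          subst hg
          refine ⟨hjr, by omega, ?_⟩
          rw [pvRootNew_get?_old root owner sets[t] t hnodup rj rj (by omega) hrr, if_neg hin]
  · intro j l hg
    rw [PySem.Dict.get?_insert] at hg
    by_cases hjt : j = (t : Int)
    · rw [if_pos hjt] at hg
      injection hg with hg
      subst hg
      intro c hc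
      have := hhb c hc
      omega
    · rw [if_neg hjt] at hg
      exact hedges j l hg
  · intro x j hg
    rw [hOwn x] at hg
    rcases howx : owner.get? x with _ | j0
    · rw [howx] at hg
      simp only [Option.isSome_none, Bool.false_eq_true, if_false] at hg
      split_ifs at hg
      injection hg with hg
      subst hg
      constructor <;> omega
    · rw [howx] at hg
      simp only [Option.isSome_some, if_true] at hg
      injection hg with hg
      subst hg
      have := hown x j0 howx
      constructor <;> omega
  · intro r hr x
    by_cases hrt : r = (t : Int)
    · subst hrt
      rw [pvClsT sets t ht ch hedges _ (fun r hr => ⟨(hhb r hr).1, (hhb r hr).2.1⟩)]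
      rw [PySem.Set.mem_ofList, List.mem_append, List.mem_flatMap]
      constructor
      · rintro (hx | ⟨rh, hrh, hx⟩)
        · rcases howx : owner.get? x with _ | j0
          · refine ⟨(t : Int), ?_, hnew⟩
            rw [hOwn x, howx]
            simp [hx]
          · obtain ⟨h0, hj0t⟩ := hown x j0 howx
            obtain ⟨rj, hrj⟩ := Option.isSome_iff_exists.mp ((hdom j0).mpr ⟨h0, hj0t⟩)
            have hin : rj ∈ pvHitsOf root owner sets[t] :=
              (pvHits_mem_inv sets t root owner sets[t] hdom hown rj).mpr ⟨x, hx, j0, howx, hrj⟩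
            refine ⟨j0, ?_, ?_⟩
            · rw [hOwn x, howx]; simp
            · rw [pvRootNew_get?_old root owner sets[t] t hnodup j0 rj (by omega) hrj, if_pos hin]
        · obtain ⟨h0, hrht, hrr⟩ := hhb rh hrh
          have hxc : x ∈ pvCls sets ch rh := by
            rw [pvCls, PySem.Set.mem_ofList]; exact hx
          obtain ⟨j, hj, hgj⟩ := (hM rh hrr x).mp hxc
          obtain ⟨hj0, hjt⟩ := hown x j hj
          refine ⟨j, ?_, ?_⟩
          · rw [hOwn x, hj]; simp
          · rw [pvRootNew_get?_old root owner sets[t] t hnodup j rh (by omega) hgj, if_pos hrh]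
      · rintro ⟨j, hoj, hgj⟩
        rw [hOwn x] at hoj
        rcases howx : owner.get? x with _ | j0
        · rw [howx] at hoj
          simp only [Option.isSome_none, Bool.false_eq_true, if_false] at hoj
          split_ifs at hoj with hxs
          exact Or.inl hxs
        · rw [howx] at hoj
          simp only [Option.isSome_some, if_true] at hoj
          injection hoj with hoj
          subst hoj
          obtain ⟨h0, hj0t⟩ := hown x j0 howx
          obtain ⟨rj, hrj⟩ := Option.isSome_iff_exists.mp ((hdom j0).mpr ⟨h0, hj0t⟩)
          rw [pvRootNew_get?_old root owner sets[t] t hnodup j0 rj (by omega) hrj] at hgj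
          by_cases hin : rj ∈ pvHitsOf root owner sets[t]
          · right
            have hrr := (hroot j0 rj hrj).2.2
            have hxc : x ∈ pvCls sets ch rj := (hM rj hrr x).mpr ⟨j0, howx, hrj⟩
            rw [pvCls, PySem.Set.mem_ofList] at hxc
            exact ⟨rj, hin, hxc⟩
          · rw [if_neg hin] at hgj
            injection hgj with hgj
            have := (hroot j0 rj hrj).2.1
            omega
    · have hsurv : PySem.Dict.get? root r = some r ∧ r ∉ pvHitsOf root owner sets[t] := by
        rcases hold : root.get? r with _ | rr
        · rw [pvRootNew_get?_none root owner sets[t] t hnodup r hrt hold] at hr; cases hr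
        · rw [pvRootNew_get?_old root owner sets[t] t hnodup r rr hrt hold] at hr
          by_cases hin : rr ∈ pvHitsOf root owner sets[t]
          · rw [if_pos hin] at hr
            injection hr with hr
            exact absurd hr.symm hrt
          · rw [if_neg hin] at hr
            injection hr with hr
            subst hr
            exact ⟨rfl, hin⟩
      obtain ⟨hrr, hnin⟩ := hsurv
      have hb := (hdom r).mp (by rw [hrr]; rfl)
      rw [pvCls_insert_stable sets ch hedges (t : Int) _ r hb.1 hb.2]
      rw [hM r hrr x]
      constructor
      · rintro ⟨j, hj, hgj⟩
        obtain ⟨hj0, hjt⟩ := hown x j hj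
        refine ⟨j, ?_, ?_⟩
        · rw [hOwn x, hj]; simp
        · rw [pvRootNew_get?_old root owner sets[t] t hnodup j r (by omega) hgj, if_neg hnin]
      · rintro ⟨j, hoj, hgj⟩
        rw [hOwn x] at hoj
        rcases howx : owner.get? x with _ | j0
        · rw [howx] at hoj
          simp only [Option.isSome_none, Bool.false_eq_true, if_false] at hoj
          split_ifs at hoj with hxs
          injection hoj with hoj
          subst hoj
          rw [hnew] at hgj
          injection hgj with hgj
          exact absurd hgj.symm hrt
        · rw [howx] at hoj
          simp only [Option.isSome_some, if_true] at hoj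
          injection hoj with hoj
          subst hoj
          obtain ⟨h0, hj0t⟩ := hown x j0 howx
          obtain ⟨rj, hrj⟩ := Option.isSome_iff_exists.mp ((hdom j0).mpr ⟨h0, hj0t⟩)
          rw [pvRootNew_get?_old root owner sets[t] t hnodup j0 rj (by omega) hrj] at hgj
          by_cases hin : rj ∈ pvHitsOf root owner sets[t]
          · rw [if_pos hin] at hgj
            injection hgj with hgj
            exact absurd hgj.symm hrt
          · rw [if_neg hin] at hgj
            injection hgj with hgj
            subst hgj
            exact ⟨j0, rfl, hrj⟩

-- one step: A's pass over the classes equals B's union-find bookkeeping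
theorem pvStep (sets : List (List Int)) (t : Nat) (ht : t < sets.length)
    (root : PySem.Dict Int Int) (ch : PySem.Dict Int (List Int)) (owner : PySem.Dict Int Int)
    (inv : pvInv sets t root ch owner) :
    pvInv sets (t + 1) (pvStepB (root, ch, owner) ((t : Int), sets[t])).1
      (pvStepB (root, ch, owner) ((t : Int), sets[t])).2.1
      (pvStepB (root, ch, owner) ((t : Int), sets[t])).2.2 ∧
    ((((pvRoots root t).map (pvCls sets ch)).foldl
        (fun (jd : List (List Int) × List (List Int)) out_set =>
          if PySem.Set.isdisjoint (PySem.Set.ofList sets[t]) out_set then (jd.1, jd.2 ++ [out_set])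
          else (jd.1 ++ [out_set], jd.2)) ([], [])).2 ++
      [(((pvRoots root t).map (pvCls sets ch)).foldl
        (fun (jd : List (List Int) × List (List Int)) out_set =>
          if PySem.Set.isdisjoint (PySem.Set.ofList sets[t]) out_set then (jd.1, jd.2 ++ [out_set])
          else (jd.1 ++ [out_set], jd.2)) ([], [])).1.foldl
          (fun a c => PySem.Set.union a c) (PySem.Set.ofList sets[t])]
      = (pvRoots (pvStepB (root, ch, owner) ((t : Int), sets[t])).1 (t + 1)).map
          (pvCls sets (pvStepB (root, ch, owner) ((t : Int), sets[t])).2.1)) := by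
  refine ⟨pvInvStep sets t ht root ch owner inv, ?_⟩
  obtain ⟨hnodup, hdom, hroot, hedges, hown, hM⟩ := inv
  have hhb : ∀ r ∈ pvHitsOf root owner sets[t], 0 ≤ r ∧ r < (t : Int) ∧ PySem.Dict.get? root r = some r :=
    fun r hr => pvHits_root sets t root owner sets[t] hdom hroot hown r hr
  have hhits := pvHits_eq_filter sets t root owner ch sets[t] hdom hroot hown hM
  rw [pvA_fold]
  simp only [List.nil_append]
  show _ = (pvRoots (pvRootNew root owner sets[t] (t : Int)) (t + 1)).map
    (pvCls sets (PySem.Dict.insert ch (t : Int) (pvHitsOf root owner sets[t])))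
  rw [pvRootsNew_eq sets t root owner ch sets[t] hnodup hdom hroot hown hM]
  rw [List.map_append, List.map_singleton]
  have hclsT := pvClsT sets t ht ch hedges (pvHitsOf root owner sets[t])
    (fun r hr => ⟨(hhb r hr).1, (hhb r hr).2.1⟩)
  rw [hclsT]
  have hunion : ((pvRoots root t).map (pvCls sets ch)).filter
      (fun c => !PySem.Set.isdisjoint (PySem.Set.ofList sets[t]) c)
      = (pvHitsOf root owner sets[t]).map (pvCls sets ch) := by
    rw [hhits, List.filter_map]
    rfl
  rw [hunion]
  have hfoldu : ((pvHitsOf root owner sets[t]).map (pvCls sets ch)).foldl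
      (fun a c => PySem.Set.union a c) (PySem.Set.ofList sets[t])
      = PySem.Set.ofList (sets[t] ++ (pvHitsOf root owner sets[t]).flatMap
          (fun r => (pvCollect ch sets.length r).flatMap (fun j => PySem.List.pyGetD sets j []))) :=
    pvFoldUnion_map _ _ _
  rw [hfoldu]
  congr 1
  rw [List.filter_map]
  apply List.map_congr_left
  intro r hr
  rw [List.mem_filter] at hr
  obtain ⟨h0, hlt, _⟩ := (pvRoots_mem root t r).mp hr.1
  exact (pvCls_insert_stable sets ch hedges (t : Int) _ r h0 hlt).symm

-- the whole loop, from any invariant-satisfying state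
theorem pvLoop (sets : List (List Int)) :
    ∀ (suf : List (List Int)) (t : Nat) (root : PySem.Dict Int Int)
      (ch : PySem.Dict Int (List Int)) (owner : PySem.Dict Int Int),
      t + suf.length = sets.length →
      sets.drop t = suf →
      pvInv sets t root ch owner →
      suf.foldl
        (fun disj_out st =>
          let p := disj_out.foldl
            (fun (jd : List (List Int) × List (List Int)) out_set =>
              if PySem.Set.isdisjoint (PySem.Set.ofList st) out_set then (jd.1, jd.2 ++ [out_set])
              else (jd.1 ++ [out_set], jd.2))
            ([], [])
          let new_class := p.1.foldl (fun a c => PySem.Set.union a c) (PySem.Set.ofList st)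
          p.2 ++ [new_class])
        ((pvRoots root t).map (pvCls sets ch))
      = (pvRoots ((PySem.List.enumerate suf (t : Int)).foldl pvStepB (root, ch, owner)).1 sets.length).map
          (pvCls sets ((PySem.List.enumerate suf (t : Int)).foldl pvStepB (root, ch, owner)).2.1) := by
  intro suf
  induction suf with
  | nil =>
    intro t root ch owner hlen _ _
    simp only [List.length_nil, Nat.add_zero] at hlen
    subst hlen
    simp [PySem.List.enumerate]
  | cons s suf ih =>
    intro t root ch owner hlen hdrop inv
    have ht : t < sets.length := by
      have := hlen; simp only [List.length_cons] at this; omega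
    have hcons : sets[t] :: sets.drop (t + 1) = s :: suf := by
      rw [← hdrop]; exact (List.drop_eq_getElem_cons ht).symm
    obtain ⟨hs, hsuf⟩ : s = sets[t] ∧ sets.drop (t + 1) = suf := by
      cases hcons; exact ⟨rfl, rfl⟩
    subst hs
    obtain ⟨inv', hstep⟩ := pvStep sets t ht root ch owner inv
    rw [PySem.List.enumerate_cons]
    simp only [List.foldl_cons]
    rw [hstep]
    have hcast : (t : Int) + 1 = ((t + 1 : Nat) : Int) := by push_cast; ring
    rw [hcast]
    exact ih (t + 1) _ _ _ (by simp only [List.length_cons] at hlen; omega) hsuf inv'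

-- B's emit loop produces the surviving roots' classes
theorem pvEmit (sets : List (List Int)) (root : PySem.Dict Int Int)
    (ch : PySem.Dict Int (List Int)) :
    (PySem.List.pyRange 0 (PySem.List.len sets) 1).foldl
      (fun out i =>
        if PySem.Dict.get? root i == some i then
          out ++ [(pvCollect ch sets.length i).foldl
                    (fun (acc : PySem.Set Int) j => PySem.Set.union acc (PySem.List.pyGetD sets j []))
                    PySem.Set.empty]
        else out)
      []
    = (pvRoots root sets.length).map (pvCls sets ch) := by
  rw [PySem.List.foldl_append_if (p := fun i => PySem.Dict.get? root i == some i)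
    (f := fun i => (pvCollect ch sets.length i).foldl
      (fun (acc : PySem.Set Int) j => PySem.Set.union acc (PySem.List.pyGetD sets j []))
      PySem.Set.empty)]
  rw [List.nil_append]
  have hlen : PySem.List.len sets = (sets.length : Int) := PySem.List.len_eq sets
  rw [hlen]
  apply List.map_congr_left
  intro i _
  have := pvFoldUnion_raw (fun j => PySem.List.pyGetD sets j []) (pvCollect ch sets.length i) []
  simpa [pvCls] using this

-- the empty state satisfies the invariant
theorem pvInv_zero (sets : List (List Int)) :
    pvInv sets 0 PySem.Dict.empty PySem.Dict.empty PySem.Dict.empty := by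
  refine ⟨PySem.Dict.nodup_keys_empty, ?_, ?_, ?_, ?_, ?_⟩
  · intro j; simp [PySem.Dict.get?_empty]
  · intro j r h; rw [PySem.Dict.get?_empty] at h; cases h
  · intro j l h; rw [PySem.Dict.get?_empty] at h; cases h
  · intro x j h; rw [PySem.Dict.get?_empty] at h; cases h
  · intro r h; rw [PySem.Dict.get?_empty] at h; cases h

-- ===== VERDICT (by name: the statement is the Claim_ definition above) =====
theorem join_sets_spec : Claim_equal_join_sets := by
  intro sets _
  unfold Spec_join_sets
  show join_sets sets = join_sets_alt sets
  have hzero : ((pvRoots PySem.Dict.empty 0).map (pvCls sets PySem.Dict.empty)) = [] := by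
    simp [pvRoots, PySem.List.pyRange_one_eq_nil (by omega : (0:Int) ≤ 0)]
  have hloop := pvLoop sets sets 0 PySem.Dict.empty PySem.Dict.empty PySem.Dict.empty
    (by simp) (by simp) (pvInv_zero sets)
  rw [hzero] at hloop
  unfold join_sets join_sets_alt
  rw [hloop]
  exact (pvEmit sets _ _).symm
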